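-- pv_equiv track=rewrite | github.com/Harshad2321/pipeline-doctor | agent/fixers/test_fixer.py | _extract_relevant_test_logs
-- ===== SOURCE A (Python) =====
-- def _extract_relevant_test_logs(logs: str, test_file: str) -> str:
--     """
--     Extract only the relevant portion of logs related to the test.
--
--     Args:
--         logs: Full cleaned logs
--         test_file: Test file name
--
--     Returns:
--         Relevant log excerpt
--     """
--     lines = logs.split('\n')
--     relevant = []
--     capture = False
--
--     for line in lines:
--         # Start capturing when we see the test file
--         if test_file in line:
--             capture = True
--
--         if capture:
--             relevant.append(line)
--
--             # Stop after capturing enough context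
--             if len(relevant) > 50:
--                 break
--
--     if relevant:
--         return '\n'.join(relevant)
--
--     # If no specific section found, return last 30 lines
--     return '\n'.join(lines[-30:])
-- ===== SOURCE B (Python) =====
-- def _extract_relevant_test_logs(logs: str, test_file: str) -> str:
--     """Index-search + slice instead of a capture-flag accumulation loop."""
--     lines = logs.split('\n')
--     for i, line in enumerate(lines):
--         if test_file in line:
--             return '\n'.join(lines[i:i + 51])
--     return '\n'.join(lines[-30:])
-- ===== Notes on version B (the rewrite author's own statement) =====
-- stated objective: simpler
-- what changed: Replaces the capture-flag accumulation loop (append each line, break after 51) with finding the first index whose line contains test_file and joining the slice lines[i:i+51], with the same last-30-lines fallback.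
import Mathlib
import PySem

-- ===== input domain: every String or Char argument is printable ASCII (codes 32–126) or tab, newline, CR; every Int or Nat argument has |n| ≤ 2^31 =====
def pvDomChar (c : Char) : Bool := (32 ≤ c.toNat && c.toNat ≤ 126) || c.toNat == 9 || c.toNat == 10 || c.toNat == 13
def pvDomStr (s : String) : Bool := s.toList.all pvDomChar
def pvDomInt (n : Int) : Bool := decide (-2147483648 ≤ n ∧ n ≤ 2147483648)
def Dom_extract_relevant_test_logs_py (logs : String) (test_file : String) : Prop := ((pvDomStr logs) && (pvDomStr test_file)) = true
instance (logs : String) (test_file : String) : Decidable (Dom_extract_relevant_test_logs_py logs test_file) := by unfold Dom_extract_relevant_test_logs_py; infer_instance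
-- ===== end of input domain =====

-- B replaces A's capture-flag accumulation loop by an index search plus a slice (objective: simpler).
-- ===== PORT A =====
-- the for-loop: state is (relevant, capture); break when len(relevant) > 50
def pvLoopA (test_file : String) : List String → List String → Bool → List String
  | [], relevant, _ => relevant
  | line :: rest, relevant, capture =>
    let capture := if PySem.Str.isIn test_file line then true else capture
    if capture then
      let relevant := relevant ++ [line]
      if relevant.length > 50 then relevant
      else pvLoopA test_file rest relevant capture
    else pvLoopA test_file rest relevant capture

def extract_relevant_test_logs_py (logs : String) (test_file : String) : String :=
  let lines := (PySem.Str.split? logs "\n").getD []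
  let relevant := pvLoopA test_file lines [] false
  if relevant ≠ [] then PySem.Str.join "\n" relevant
  else PySem.Str.join "\n" (PySem.List.slice lines (some (-30)) none)

-- ===== PORT B =====
-- first index i with test_file in lines[i] (the 'for i, line in enumerate' search)
def pvFindB (test_file : String) : List String → Option Nat
  | [] => none
  | line :: rest =>
    if PySem.Str.isIn test_file line then some 0
    else (pvFindB test_file rest).map (· + 1)

def extract_relevant_test_logs_py_alt (logs : String) (test_file : String) : String :=
  let lines := (PySem.Str.split? logs "\n").getD []
  match pvFindB test_file lines with
  | some i => PySem.Str.join "\n" (PySem.List.slice lines (some (i : Int)) (some ((i : Int) + 51)))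
  | none => PySem.Str.join "\n" (PySem.List.slice lines (some (-30)) none)

-- ===== PRECONDITION & SPEC =====
def Spec_extract_relevant_test_logs_py (logs : String) (test_file : String) (out : String) : Prop := out = extract_relevant_test_logs_py_alt logs test_file
instance (logs : String) (test_file : String) (out : String) : Decidable (Spec_extract_relevant_test_logs_py logs test_file out) := by unfold Spec_extract_relevant_test_logs_py; infer_instance

-- ===== CLAIM (what is proved, stated in full; the proofs are below) =====
def Claim_equal_extract_relevant_test_logs_py : Prop := ∀ (logs : String) (test_file : String), Dom_extract_relevant_test_logs_py logs test_file → Spec_extract_relevant_test_logs_py logs test_file (extract_relevant_test_logs_py logs test_file)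

-- ===== LEMMAS AND PROOFS =====

-- once capture is true, A's loop just collects lines until 51 are gathered
theorem pvLoopA_capture (tf : String) (ls : List String) :
    ∀ rel : List String, rel.length ≤ 50 →
      pvLoopA tf ls rel true = rel ++ ls.take (51 - rel.length) := by
  induction ls with
  | nil => intro rel _; simp [pvLoopA]
  | cons l rest ih =>
    intro rel hrel
    simp only [pvLoopA, ite_self]
    by_cases h50 : rel.length = 50
    · rw [if_pos (show (rel ++ [l]).length > 50 by simp [h50])]
      have h1 : 51 - rel.length = 1 := by omega
      simp [h1]
    · rw [if_neg (show ¬ (rel ++ [l]).length > 50 by simp; omega)]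
      rw [ih (rel ++ [l]) (by simp; omega)]
      have h1 : 51 - rel.length = (51 - (rel ++ [l]).length) + 1 := by simp; omega
      simp [h1, List.take_succ_cons, List.append_assoc]

-- A's loop from the initial state, characterised by B's index search
theorem pvLoopA_eq (tf : String) (ls : List String) :
    pvLoopA tf ls [] false =
      match pvFindB tf ls with
      | some i => (ls.drop i).take 51
      | none => [] := by
  induction ls with
  | nil => simp [pvLoopA, pvFindB]
  | cons l rest ih =>
    by_cases h : PySem.Str.isIn tf l
    · simp only [pvLoopA, pvFindB, h, if_true]
      rw [if_neg (show ¬ (([] : List String) ++ [l]).length > 50 by simp)]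
      rw [pvLoopA_capture tf rest ([] ++ [l]) (by simp)]
      simp
    · simp only [pvLoopA, pvFindB, h, Bool.false_eq_true, if_false]
      rw [ih]
      cases hf : pvFindB tf rest <;> simp

theorem pvFindB_lt (tf : String) (ls : List String) (i : Nat)
    (h : pvFindB tf ls = some i) : i < ls.length := by
  induction ls generalizing i with
  | nil => simp [pvFindB] at h
  | cons l rest ih =>
    simp only [pvFindB] at h
    split at h
    · simp only [Option.some.injEq] at h
      simp; omega
    · cases hf : pvFindB tf rest with
      | none => simp [hf] at h
      | some j =>
        simp [hf] at h
        have := ih j hf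
        simp; omega

-- ===== VERDICT (by name: the statement is the Claim_ definition above) =====
theorem extract_relevant_test_logs_py_spec : Claim_equal_extract_relevant_test_logs_py := by
  intro logs tf _
  unfold Spec_extract_relevant_test_logs_py
  show extract_relevant_test_logs_py logs tf = extract_relevant_test_logs_py_alt logs tf
  rw [extract_relevant_test_logs_py, extract_relevant_test_logs_py_alt]
  generalize (PySem.Str.split? logs "\n").getD [] = lines
  rw [pvLoopA_eq]
  cases hf : pvFindB tf lines with
  | none => simp
  | some i =>
    have hi := pvFindB_lt tf lines i hf
    have hcast : ((i : Int) + 51) = ((i + 51 : Nat) : Int) := by push_cast; ring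
    have hslice : PySem.List.slice lines (some (i : Int)) (some ((i : Int) + 51))
        = (lines.drop i).take 51 := by
      rw [hcast, PySem.List.slice_natCast]
      congr 1; omega
    have hne : (lines.drop i).take 51 ≠ [] := by
      simp [List.take_eq_nil_iff, List.drop_eq_nil_iff]; omega
    simp only [hslice, if_pos hne]
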